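-- pv_equiv track=rewrite | github.com/berkeleyphylogenomics/BPG_utilities | bpg/common/utils/get_phobius_tmhelix.py | get_signal_peptide_regions
-- ===== SOURCE A (Python) =====
-- def get_signal_peptide_regions(regtype, regstart, regend):
-- # This function takes the three outputs of get_phobius_results_for_seq and
-- # returns .
--     tstart = []
--     tend = []
--     nstart = []
--     nend =[]
--     hstart = []
--     hend =[]
--     cstart =[]
--     cend = []
--     for x in range(len(regtype)):
--         if regtype[x] == "SIGNAL":
--             tstart.append(regstart[x])
--             tend.append(regend[x])
--         elif regtype[x] == "REGION:N-REGION.":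
--             nstart.append(regstart[x])
--             nend.append(regend[x])
--         elif regtype[x] == "REGION:H-REGION.":
--             hstart.append(regstart[x])
--             hend.append(regend[x])
--         elif regtype[x] == "REGION:C-REGION.":
--             cstart.append(regstart[x])
--             cend.append(regend[x])
--
--     return (tstart, tend, nstart, nend, hstart, hend, cstart, cend)
-- ===== SOURCE B (Python) =====
-- def get_signal_peptide_regions(regtype, regstart, regend):
--     rows = list(zip(regtype, regstart, regend))
--     def starts(name):
--         return [s for (t, s, e) in rows if t == name]
--     def ends(name):
--         return [e for (t, s, e) in rows if t == name]
--     return (starts("SIGNAL"), ends("SIGNAL"),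
--             starts("REGION:N-REGION."), ends("REGION:N-REGION."),
--             starts("REGION:H-REGION."), ends("REGION:H-REGION."),
--             starts("REGION:C-REGION."), ends("REGION:C-REGION."))
-- ===== Notes on version B (the rewrite author's own statement) =====
-- stated objective: simpler
-- what changed: Replaces the single index loop with an if/elif routing chain and eight mutable accumulators by a zip of the three lists followed by eight independent filtered list comprehensions, one per output list.
-- outside the precondition, e.g. on get_signal_peptide_regions(['SIGNAL'], [], []): A raises IndexError, B returns ([], [], [], [], [], [], [], [])
import Mathlib
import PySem

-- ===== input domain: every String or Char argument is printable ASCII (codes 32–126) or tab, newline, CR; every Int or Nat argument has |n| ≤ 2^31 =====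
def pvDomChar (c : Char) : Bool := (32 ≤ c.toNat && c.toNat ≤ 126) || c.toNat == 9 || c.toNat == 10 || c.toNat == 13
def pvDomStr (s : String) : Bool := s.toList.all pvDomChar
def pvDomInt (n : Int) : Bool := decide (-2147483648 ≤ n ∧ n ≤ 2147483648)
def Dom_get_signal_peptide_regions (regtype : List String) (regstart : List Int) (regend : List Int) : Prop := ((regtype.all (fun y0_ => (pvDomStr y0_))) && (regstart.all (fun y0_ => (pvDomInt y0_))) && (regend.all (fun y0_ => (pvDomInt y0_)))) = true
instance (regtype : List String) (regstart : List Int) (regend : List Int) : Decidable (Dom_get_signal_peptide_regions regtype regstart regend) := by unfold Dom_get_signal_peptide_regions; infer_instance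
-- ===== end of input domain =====

-- B replaces A's single routing loop (if/elif chain over eight accumulators) by a zip of the
-- three lists and eight independent filtered comprehensions — objective: simpler.

-- ===== PORT A =====
-- state: the eight accumulator lists in A's order
abbrev pvStateA := List Int × List Int × List Int × List Int × List Int × List Int × List Int × List Int

-- one iteration of A's for-loop body at index x (regtype[x]/regstart[x]/regend[x]; under
-- Pre_ every index actually read is in range, so getD is exact there)
def pvStepA (regtype : List String) (regstart : List Int) (regend : List Int)
    (st : pvStateA) (x : Nat) : pvStateA :=
  match st with
  | (ts, te, ns, ne, hs, he, cs, ce) =>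
    if regtype.getD x "" == "SIGNAL" then
      (ts ++ [regstart.getD x 0], te ++ [regend.getD x 0], ns, ne, hs, he, cs, ce)
    else if regtype.getD x "" == "REGION:N-REGION." then
      (ts, te, ns ++ [regstart.getD x 0], ne ++ [regend.getD x 0], hs, he, cs, ce)
    else if regtype.getD x "" == "REGION:H-REGION." then
      (ts, te, ns, ne, hs ++ [regstart.getD x 0], he ++ [regend.getD x 0], cs, ce)
    else if regtype.getD x "" == "REGION:C-REGION." then
      (ts, te, ns, ne, hs, he, cs ++ [regstart.getD x 0], ce ++ [regend.getD x 0])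
    else st

def get_signal_peptide_regions (regtype : List String) (regstart : List Int) (regend : List Int) : List Int × List Int × List Int × List Int × List Int × List Int × List Int × List Int :=
  (List.range regtype.length).foldl (pvStepA regtype regstart regend)
    ([], [], [], [], [], [], [], [])

-- ===== PORT B =====
def pvRows (regtype : List String) (regstart : List Int) (regend : List Int) :
    List (String × Int × Int) :=
  regtype.zip (regstart.zip regend)

def pvStarts (name : String) (rows : List (String × Int × Int)) : List Int :=
  (rows.filter (fun r => r.1 == name)).map (fun r => r.2.1)

def pvEnds (name : String) (rows : List (String × Int × Int)) : List Int :=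
  (rows.filter (fun r => r.1 == name)).map (fun r => r.2.2)

def get_signal_peptide_regions_alt (regtype : List String) (regstart : List Int) (regend : List Int) : List Int × List Int × List Int × List Int × List Int × List Int × List Int × List Int :=
  let rows := pvRows regtype regstart regend
  (pvStarts "SIGNAL" rows, pvEnds "SIGNAL" rows,
   pvStarts "REGION:N-REGION." rows, pvEnds "REGION:N-REGION." rows,
   pvStarts "REGION:H-REGION." rows, pvEnds "REGION:H-REGION." rows,
   pvStarts "REGION:C-REGION." rows, pvEnds "REGION:C-REGION." rows)

-- ===== PRECONDITION & SPEC =====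
-- Pre_ excludes exactly the inputs on which A raises IndexError: an index whose regtype entry
-- matches one of the four region names but lies beyond regstart or regend.
def Pre_get_signal_peptide_regions (regtype : List String) (regstart : List Int) (regend : List Int) : Prop :=
  ∀ i : Nat, i < regtype.length →
    (regtype.getD i "" = "SIGNAL" ∨ regtype.getD i "" = "REGION:N-REGION." ∨
     regtype.getD i "" = "REGION:H-REGION." ∨ regtype.getD i "" = "REGION:C-REGION.") →
    i < regstart.length ∧ i < regend.length

instance (regtype : List String) (regstart : List Int) (regend : List Int) : Decidable (Pre_get_signal_peptide_regions regtype regstart regend) := by unfold Pre_get_signal_peptide_regions; infer_instance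

def pvWitness_get_signal_peptide_regions : List String × List Int × List Int :=
  (["SIGNAL", "x", "REGION:C-REGION."], [1, 2, 3], [4, 5, 6])

def Spec_get_signal_peptide_regions (regtype : List String) (regstart : List Int) (regend : List Int) (out : List Int × List Int × List Int × List Int × List Int × List Int × List Int × List Int) : Prop := out = get_signal_peptide_regions_alt regtype regstart regend
instance (regtype : List String) (regstart : List Int) (regend : List Int) (out : List Int × List Int × List Int × List Int × List Int × List Int × List Int × List Int) : Decidable (Spec_get_signal_peptide_regions regtype regstart regend out) := by
  unfold Spec_get_signal_peptide_regions
  letI : DecidableEq (List Int × List Int × List Int × List Int) := instDecidableEqProd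
  infer_instance

-- ===== CLAIM (what is proved, stated in full; the proofs are below) =====
def Claim_equal_get_signal_peptide_regions : Prop := ∀ (regtype : List String) (regstart : List Int) (regend : List Int), Dom_get_signal_peptide_regions regtype regstart regend → Pre_get_signal_peptide_regions regtype regstart regend → Spec_get_signal_peptide_regions regtype regstart regend (get_signal_peptide_regions regtype regstart regend)

-- ===== LEMMAS AND PROOFS =====

-- B's eight outputs, as a function of the row list (B applied to the zipped rows).
def pvEightOf (rows : List (String × Int × Int)) : pvStateA :=
  (pvStarts "SIGNAL" rows, pvEnds "SIGNAL" rows,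
   pvStarts "REGION:N-REGION." rows, pvEnds "REGION:N-REGION." rows,
   pvStarts "REGION:H-REGION." rows, pvEnds "REGION:H-REGION." rows,
   pvStarts "REGION:C-REGION." rows, pvEnds "REGION:C-REGION." rows)

theorem pvEightOf_append_one (rows : List (String × Int × Int)) (r : String × Int × Int) :
    pvEightOf (rows ++ [r]) =
      (match pvEightOf rows with
       | (ts, te, ns, ne, hs, he, cs, ce) =>
        if r.1 == "SIGNAL" then (ts ++ [r.2.1], te ++ [r.2.2], ns, ne, hs, he, cs, ce)
        else if r.1 == "REGION:N-REGION." then (ts, te, ns ++ [r.2.1], ne ++ [r.2.2], hs, he, cs, ce)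
        else if r.1 == "REGION:H-REGION." then (ts, te, ns, ne, hs ++ [r.2.1], he ++ [r.2.2], cs, ce)
        else if r.1 == "REGION:C-REGION." then (ts, te, ns, ne, hs, he, cs ++ [r.2.1], ce ++ [r.2.2])
        else (ts, te, ns, ne, hs, he, cs, ce)) := by
  simp only [pvEightOf, pvStarts, pvEnds, List.filter_append, List.map_append,
    List.filter_cons, List.filter_nil]
  by_cases h1 : r.1 = "SIGNAL" <;> by_cases h2 : r.1 = "REGION:N-REGION." <;>
    by_cases h3 : r.1 = "REGION:H-REGION." <;> by_cases h4 : r.1 = "REGION:C-REGION." <;>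
    simp_all

theorem pvLoop_eq (regtype : List String) (regstart : List Int) (regend : List Int)
    (hpre : Pre_get_signal_peptide_regions regtype regstart regend) :
    ∀ n, n ≤ regtype.length →
      (List.range n).foldl (pvStepA regtype regstart regend) ([], [], [], [], [], [], [], []) =
        pvEightOf ((pvRows regtype regstart regend).take n) := by
  intro n
  induction n with
  | zero => intro _; rfl
  | succ n ih =>
    intro hn
    have hn' : n < regtype.length := hn
    rw [List.range_succ, List.foldl_append, ih (Nat.le_of_lt hn')]
    simp only [List.foldl_cons, List.foldl_nil]
    have hlenrows : (pvRows regtype regstart regend).length =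
        min regtype.length (min regstart.length regend.length) := by
      simp [pvRows]
    by_cases hin : n < (pvRows regtype regstart regend).length
    · -- the row at index n exists: both sides append the same element (or nothing)
      have hs : n < regstart.length := by omega
      have he : n < regend.length := by omega
      have htake : (pvRows regtype regstart regend).take (n + 1) =
          (pvRows regtype regstart regend).take n ++ [(pvRows regtype regstart regend)[n]] := by
        rw [List.take_add_one]
        simp [List.getElem?_eq_getElem hin]
      rw [htake, pvEightOf_append_one]
      have hrow : (pvRows regtype regstart regend)[n] =
          (regtype[n], regstart[n], regend[n]) := by
        simp [pvRows]
      rw [hrow]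
      simp only [pvStepA, List.getD_eq_getElem regtype "" hn', List.getD_eq_getElem regstart 0 hs,
        List.getD_eq_getElem regend 0 he]
    · -- no row at index n: by Pre_, regtype[n] matches none of the names; both sides unchanged
      have htake : (pvRows regtype regstart regend).take (n + 1) =
          (pvRows regtype regstart regend).take n := by
        rw [List.take_add_one]
        simp [List.getElem?_eq_none (by omega : (pvRows regtype regstart regend).length ≤ n)]
      rw [htake]
      have hnomatch : ¬ (regtype.getD n "" = "SIGNAL" ∨ regtype.getD n "" = "REGION:N-REGION." ∨
          regtype.getD n "" = "REGION:H-REGION." ∨ regtype.getD n "" = "REGION:C-REGION.") := by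
        intro hm
        have := hpre n hn' hm
        omega
      simp only [not_or] at hnomatch
      obtain ⟨h1, h2, h3, h4⟩ := hnomatch
      simp only [List.getD] at h1 h2 h3 h4
      simp [pvStepA, List.getD, h1, h2, h3, h4]

-- ===== VERDICT (by name: the statement is the Claim_ definition above) =====
theorem get_signal_peptide_regions_spec : Claim_equal_get_signal_peptide_regions := by
  intro regtype regstart regend _ hpre
  unfold Spec_get_signal_peptide_regions get_signal_peptide_regions
  have h := pvLoop_eq regtype regstart regend hpre regtype.length (le_refl _)
  have htake : (pvRows regtype regstart regend).take regtype.length =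
      pvRows regtype regstart regend := by
    apply List.take_of_length_le
    simp [pvRows]
  rw [htake] at h
  exact h
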